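-- pv_equiv track=rewrite | github.com/FSoft-AI4Code/TheVault | src/utils/noise_removal/noise_removal.py | remove_lines_contain_only_a_single_char
-- ===== SOURCE A (Python) =====
-- def remove_lines_contain_only_a_single_char(docstring):
--     """
--     This function applies at line-level
--     """
--     patterns = ["*", "/", "=", "-", "+"]
--     lines = docstring.strip().split("\n")
--     for i, line in enumerate(lines):
--         if line.strip() in patterns:
--             lines[i] = ""
--             continue
--
--     docstring = "\n".join(lines).strip()
--
--     return docstring
-- ===== SOURCE B (Python) =====
-- import re
--
-- # One multiline regex substitution instead of split/loop/join: a line that is a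
-- # single -,*,/,=,+ (around optional spaces/tabs/CRs) is replaced by the empty line.
-- _SINGLE_PUNCT_LINE = re.compile(r'^[ \t\r]*[*/=+-][ \t\r]*$', re.MULTILINE)
--
-- def remove_lines_contain_only_a_single_char(docstring):
--     """
--     This function applies at line-level
--     """
--     return _SINGLE_PUNCT_LINE.sub("", docstring.strip()).strip()
-- ===== Notes on version B (the rewrite author's own statement) =====
-- stated objective: idiomatic
-- what changed: Replaces the strip/split-into-lines/index-mutating-loop/join pipeline with a single compiled multiline regex substitution that blanks any line consisting of one of the five punctuation chars around optional spaces, tabs or CRs, then strips.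
import Mathlib
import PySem

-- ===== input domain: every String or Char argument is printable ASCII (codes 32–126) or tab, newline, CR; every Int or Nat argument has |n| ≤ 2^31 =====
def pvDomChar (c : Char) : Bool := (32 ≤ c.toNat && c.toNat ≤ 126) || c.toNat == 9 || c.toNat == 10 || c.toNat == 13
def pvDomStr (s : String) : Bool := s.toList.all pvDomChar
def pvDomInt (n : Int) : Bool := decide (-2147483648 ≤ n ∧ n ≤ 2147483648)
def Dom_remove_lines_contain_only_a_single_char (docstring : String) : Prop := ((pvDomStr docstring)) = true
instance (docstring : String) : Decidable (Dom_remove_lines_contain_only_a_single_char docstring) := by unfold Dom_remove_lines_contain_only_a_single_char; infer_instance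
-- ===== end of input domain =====

-- B replaces A's index-mutating loop over split lines by one anchored multiline-regex substitution (idiomatic; return value only, neither mutates its argument).

-- ===== PORT A =====
def remove_lines_contain_only_a_single_char (docstring : String) : String :=
  let patterns : List String := ["*", "/", "=", "-", "+"]
  let lines := (PySem.Str.split? (PySem.Str.strip docstring) "\n").getD []
  let lines := (PySem.List.enumerate lines).foldl
    (fun ls p => if patterns.contains (PySem.Str.strip p.2) then ls.set p.1.toNat "" else ls)
    lines
  PySem.Str.strip (PySem.Str.join "\n" lines)

-- ===== PORT B =====
-- Hand port of Source B's compiled regex  r'^[ \t\r]*[*/=+-][ \t\r]*$'  with re.MULTILINE.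
-- Exact here: the pattern is ^…$-anchored and its character classes cannot match '\n',
-- so .sub("", s) rewrites each '\n'-separated line of s independently; reMatchLine is the
-- (deterministic, backtracking-free: the two classes are disjoint) matcher for one line.
def reWs (c : Char) : Bool := c == ' ' || c == '\t' || c == '\r'
def rePunct (c : Char) : Bool := c == '*' || c == '/' || c == '=' || c == '+' || c == '-'
def reMatchLine (cs : List Char) : Bool :=
  match cs.dropWhile reWs with
  | [] => false
  | c :: rest => rePunct c && (rest.dropWhile reWs).isEmpty

def remove_lines_contain_only_a_single_char_alt (docstring : String) : String :=
  let s := PySem.Str.strip docstring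
  let lines := (PySem.Str.split? s "\n").getD []
  PySem.Str.strip (PySem.Str.join "\n"
    (lines.map (fun l => if reMatchLine l.toList then "" else l)))

-- ===== PRECONDITION & SPEC =====
def Spec_remove_lines_contain_only_a_single_char (docstring : String) (out : String) : Prop := out = remove_lines_contain_only_a_single_char_alt docstring
instance (docstring : String) (out : String) : Decidable (Spec_remove_lines_contain_only_a_single_char docstring out) := by unfold Spec_remove_lines_contain_only_a_single_char; infer_instance

-- ===== CLAIM (what is proved, stated in full; the proofs are below) =====
def Claim_equal_remove_lines_contain_only_a_single_char : Prop := ∀ (docstring : String), Dom_remove_lines_contain_only_a_single_char docstring → Spec_remove_lines_contain_only_a_single_char docstring (remove_lines_contain_only_a_single_char docstring)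

-- ===== LEMMAS AND PROOFS =====

-- A's for-loop with `lines[i] = ""` is a pointwise map over the list of lines.
theorem foldl_set_eq_map (cond : String → Bool) :
    ∀ (xs pre : List String),
      (PySem.List.enumerate xs (pre.length : Int)).foldl
        (fun ls p => if cond p.2 then ls.set p.1.toNat "" else ls) (pre ++ xs)
      = pre ++ xs.map (fun l => if cond l then "" else l) := by
  intro xs
  induction xs with
  | nil => intro pre; simp [PySem.List.enumerate_nil]
  | cons x xs ih =>
    intro pre
    rw [PySem.List.enumerate_cons, List.foldl_cons]
    have hset : (if cond ((pre.length : Int), x).2 then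
          (pre ++ x :: xs).set ((pre.length : Int), x).1.toNat "" else pre ++ x :: xs)
        = (pre ++ [if cond x then "" else x]) ++ xs := by
      by_cases h : cond x
      · simp [h]
      · simp [h]
    rw [hset]
    have hlen : ((pre.length : Int) + 1) = ((pre ++ [if cond x then "" else x]).length : Int) := by
      simp
    rw [hlen, ih (pre ++ [if cond x then "" else x])]
    simp

theorem foldl_set_eq_map0 (cond : String → Bool) (xs : List String) :
    (PySem.List.enumerate xs).foldl
      (fun ls p => if cond p.2 then ls.set p.1.toNat "" else ls) xs
    = xs.map (fun l => if cond l then "" else l) := by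
  simpa using foldl_set_eq_map cond xs []

-- characters of a stripped string are characters of the string
theorem mem_strip (ch : Char) (cs : List Char) (h : ch ∈ PySem.Chars.strip cs) : ch ∈ cs := by
  simp only [PySem.Chars.strip, PySem.Chars.rstrip, PySem.Chars.lstrip, List.mem_reverse] at h
  exact (List.dropWhile_sublist _).subset ((List.mem_reverse).1 ((List.dropWhile_sublist _).subset h))

-- invariant of PySem's split loop: every produced piece consists of non-separator input chars
theorem splitOn_go_mem (c : Char) (Q R : Char → Prop)
    (hQR : ∀ ch, R ch → ch ≠ c → Q ch) :
    ∀ (fuel : Nat) (l cur : List Char) (acc : List (List Char)),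
      l.length < fuel →
      (∀ ch ∈ cur, Q ch) → (∀ p ∈ acc, ∀ ch ∈ p, Q ch) → (∀ ch ∈ l, R ch) →
      ∀ p ∈ PySem.Chars.splitOn.go [c] fuel l cur acc, ∀ ch ∈ p, Q ch := by
  intro fuel
  induction fuel with
  | zero => intro l cur acc hf; omega
  | succ fuel ih =>
    intro l cur acc hf hcur hacc hl
    match l with
    | [] =>
      simp only [PySem.Chars.splitOn.go]
      intro p hp
      simp only [List.mem_reverse, List.mem_cons] at hp
      rcases hp with h | h
      · subst h; intro ch hch; exact hcur ch (List.mem_reverse.1 hch)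
      · exact hacc p h
    | c' :: rest =>
      simp only [PySem.Chars.splitOn.go]
      by_cases hpre : List.isPrefixOf [c] (c' :: rest)
      · simp only [hpre, if_true]
        apply ih
        · simp only [List.length_drop, List.length_cons] at hf ⊢; omega
        · intro ch hch; simp at hch
        · intro p hp ch hch
          rcases List.mem_cons.1 hp with h | h
          · subst h; exact hcur ch (List.mem_reverse.1 hch)
          · exact hacc p h ch hch
        · intro ch hch
          simp only [List.length_singleton, List.drop_one, List.tail_cons] at hch
          exact hl ch (by simp [hch])
      · simp only [hpre]
        have hc' : c' ≠ c := by
          intro h; subst h; exact hpre (by simp [List.isPrefixOf])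
        apply ih
        · simp at hf ⊢; omega
        · intro ch hch
          rcases List.mem_cons.1 hch with h | h
          · subst h; exact hQR ch (hl ch (by simp)) hc'
          · exact hcur ch h
        · exact hacc
        · intro ch hch; exact hl ch (by simp [hch])

theorem splitOn_mem (c : Char) (cs : List Char) (R : Char → Prop) (hR : ∀ ch ∈ cs, R ch)
    (p : List Char) (hp : p ∈ PySem.Chars.splitOn cs [c]) :
    ∀ ch ∈ p, R ch ∧ ch ≠ c := by
  intro ch hch
  exact splitOn_go_mem c (fun ch => R ch ∧ ch ≠ c) R (fun ch hr hne => ⟨hr, hne⟩)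
    (cs.length + 1) cs [] [] (by omega) (by simp) (by simp) hR p hp ch hch

theorem beq_toNat (c d : Char) : (c == d) = decide (c.toNat = d.toNat) := by
  by_cases h : c = d
  · subst h; simp
  · have : c.toNat ≠ d.toNat := fun hh => h (Char.ext (UInt32.toNat_inj.mp hh))
    simp [h, this]

theorem isspace_eq_reWs (c : Char) (hd : pvDomChar c = true) (hn : c ≠ '\n') :
    PySem.Chars.isspace c = reWs c := by
  have hn' : c.toNat ≠ 10 := fun h => hn (Char.ext (UInt32.toNat_inj.mp h))
  have h32 : (' ').toNat = 32 := by decide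
  have h9 : ('\t').toNat = 9 := by decide
  have h13 : ('\r').toNat = 13 := by decide
  rw [Bool.eq_iff_iff]
  simp only [PySem.Chars.isspace, reWs, beq_toNat, pvDomChar, h32, h9, h13,
    Bool.or_eq_true, Bool.and_eq_true, decide_eq_true_eq, beq_iff_eq] at hd ⊢
  omega

theorem dropWhile_congr' (p q : Char → Bool) :
    ∀ cs : List Char, (∀ c ∈ cs, p c = q c) → cs.dropWhile p = cs.dropWhile q := by
  intro cs
  induction cs with
  | nil => intro _; rfl
  | cons c t ih =>
    intro h
    rw [List.dropWhile_cons, List.dropWhile_cons, h c (by simp)]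
    by_cases hq : q c
    · simp [hq]; exact ih (fun x hx => h x (by simp [hx]))
    · simp [hq]

theorem dropWhile_head_false (p : Char → Bool) :
    ∀ (cs : List Char) (c : Char) (rest : List Char), cs.dropWhile p = c :: rest → p c = false := by
  intro cs
  induction cs with
  | nil => intro c rest h; simp at h
  | cons c' t ih =>
    intro c rest h
    rw [List.dropWhile_cons] at h
    by_cases hp : p c'
    · simp [hp] at h; exact ih c rest h
    · simp [hp] at h; rw [← h.1]; simp [hp]

theorem contains_toList (s : String) : (["*","/","=","-","+"] : List String).contains s
    = ([['*'],['/'],['='],['-'],['+']] : List (List Char)).contains s.toList := by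
  rw [Bool.eq_iff_iff]
  simp only [List.contains_iff_mem, List.mem_cons, List.not_mem_nil, or_false, ← String.toList_inj]
  rfl

theorem cond_eq (l : String)
    (h : ∀ ch ∈ l.toList, pvDomChar ch = true ∧ ch ≠ '\n') :
    (["*", "/", "=", "-", "+"] : List String).contains (PySem.Str.strip l)
      = reMatchLine l.toList := by
  have hiss : ∀ ch ∈ l.toList, PySem.Chars.isspace ch = reWs ch :=
    fun ch hch => isspace_eq_reWs ch (h ch hch).1 (h ch hch).2
  have hL : l.toList.dropWhile PySem.Chars.isspace = l.toList.dropWhile reWs :=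
    dropWhile_congr' _ _ _ hiss
  have hstrip : (PySem.Str.strip l).toList
      = ((l.toList.dropWhile reWs).reverse.dropWhile PySem.Chars.isspace).reverse := by
    simp [PySem.Str.toList_strip, PySem.Chars.strip, PySem.Chars.rstrip, PySem.Chars.lstrip, hL]
  have hsub : ∀ ch ∈ l.toList.dropWhile reWs, ch ∈ l.toList :=
    fun ch hch => (List.dropWhile_sublist _).subset hch
  rw [contains_toList]
  rcases ht : l.toList.dropWhile reWs with _ | ⟨c, rest⟩
  · have htl : (PySem.Str.strip l).toList = [] := by rw [hstrip, ht]; simp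
    rw [htl]
    simp [reMatchLine, ht]
  · have hc : reWs c = false := dropWhile_head_false _ _ _ _ ht
    have hmemc : c ∈ l.toList := hsub c (by simp [ht])
    have hmemrest : ∀ ch ∈ rest, ch ∈ l.toList := fun ch hch => hsub ch (by simp [ht, hch])
    have hrw : (c :: rest).reverse.dropWhile PySem.Chars.isspace
        = (c :: rest).reverse.dropWhile reWs := by
      apply dropWhile_congr'
      intro x hx
      rcases List.mem_cons.1 (List.mem_reverse.1 hx) with hx' | hx'
      · subst hx'; exact hiss x hmemc
      · exact hiss x (hmemrest x hx')
    have hrev : (c :: rest).reverse = rest.reverse ++ [c] := by simp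
    have htl : (PySem.Str.strip l).toList
        = ((rest.reverse.dropWhile reWs) ++ [c]).reverse := by
      rw [hstrip, ht, hrw, hrev, List.dropWhile_append]
      by_cases he : (rest.reverse.dropWhile reWs).isEmpty
      · have he' : rest.reverse.dropWhile reWs = [] := List.isEmpty_iff.1 he
        rw [he']
        simp [hc]
      · simp [he]
    have hiso : (rest.reverse.dropWhile reWs = []) ↔ (rest.dropWhile reWs = []) := by
      simp only [List.dropWhile_eq_nil_iff, List.mem_reverse]
    rw [htl]
    simp only [reMatchLine, ht]
    rcases hnil : rest.reverse.dropWhile reWs with _ | ⟨d, ds⟩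
    · have hre : rest.dropWhile reWs = [] := hiso.1 hnil
      rw [hre]
      have hc1 : (([] : List Char) ++ [c]).reverse = [c] := by simp
      rw [hc1]
      rw [Bool.eq_iff_iff]
      simp only [List.isEmpty_nil, Bool.and_true, List.contains_iff_mem, List.mem_cons,
        List.not_mem_nil, or_false, List.cons.injEq, and_true, rePunct, Bool.or_eq_true,
        beq_iff_eq]
      constructor
      · rintro (h | h | h | h | h)
        · exact Or.inl (Or.inl (Or.inl (Or.inl h)))
        · exact Or.inl (Or.inl (Or.inl (Or.inr h)))
        · exact Or.inl (Or.inl (Or.inr h))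
        · exact Or.inr h
        · exact Or.inl (Or.inr h)
      · rintro ((((h | h) | h) | h) | h)
        · exact Or.inl h
        · exact Or.inr (Or.inl h)
        · exact Or.inr (Or.inr (Or.inl h))
        · exact Or.inr (Or.inr (Or.inr (Or.inr h)))
        · exact Or.inr (Or.inr (Or.inr (Or.inl h)))
    · have hre : rest.dropWhile reWs ≠ [] := fun hh => by
        rw [hiso.2 hh] at hnil; exact (List.cons_ne_nil d ds) hnil.symm
      have hre' : (rest.dropWhile reWs).isEmpty = false := by
        rw [List.isEmpty_eq_false_iff]; exact hre
      rw [hre']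
      rw [Bool.eq_iff_iff]
      simp only [List.contains_iff_mem, List.mem_cons, List.not_mem_nil, or_false,
        Bool.and_false]
      constructor
      · intro hm
        exfalso
        have hlen : (((d :: ds) ++ [c]).reverse).length = ds.length + 2 := by simp
        rcases hm with h1 | h1 | h1 | h1 | h1 <;> (rw [h1] at hlen; simp at hlen)
      · intro hf
        exact absurd hf (by simp)


-- ===== VERDICT (by name: the statement is the Claim_ definition above) =====
theorem remove_lines_contain_only_a_single_char_spec : Claim_equal_remove_lines_contain_only_a_single_char := by
  intro docstring hdom
  unfold Spec_remove_lines_contain_only_a_single_char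
  unfold remove_lines_contain_only_a_single_char remove_lines_contain_only_a_single_char_alt
  have hsplit : PySem.Str.split? (PySem.Str.strip docstring) "\n"
      = some (List.map String.ofList
          (PySem.Chars.splitOn (PySem.Str.strip docstring).toList ['\n'])) := by
    simp [PySem.Str.split?, PySem.Chars.split?]
  simp only [hsplit, Option.getD_some]
  rw [foldl_set_eq_map0 (fun l => (["*", "/", "=", "-", "+"] : List String).contains (PySem.Str.strip l))]
  have hmap :
      (List.map String.ofList (PySem.Chars.splitOn (PySem.Str.strip docstring).toList ['\n'])).map
        (fun l => if (["*", "/", "=", "-", "+"] : List String).contains (PySem.Str.strip l) then "" else l)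
      = (List.map String.ofList (PySem.Chars.splitOn (PySem.Str.strip docstring).toList ['\n'])).map
        (fun l => if reMatchLine l.toList then "" else l) := by
    apply List.map_congr_left
    intro l hl
    obtain ⟨p, hp, rfl⟩ := List.mem_map.1 hl
    have hdom' : ∀ ch ∈ (PySem.Str.strip docstring).toList, pvDomChar ch = true := by
      intro ch hch
      rw [PySem.Str.toList_strip] at hch
      have : ch ∈ docstring.toList := mem_strip ch docstring.toList hch
      exact List.all_eq_true.1 hdom ch this
    have hQ := splitOn_mem '\n' (PySem.Str.strip docstring).toList
      (fun ch => pvDomChar ch = true) hdom' p hp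
    rw [cond_eq (String.ofList p) (by simpa using hQ)]
  rw [hmap]
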